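-- pv_equiv track=rewrite | github.com/johBac97/mirex2025-musecoco | utils_midi/remi_utils.py | from_remi_get_pos_per_track_dict
-- ===== SOURCE A (Python) =====
-- def from_remi_get_insts(remi_seq, sort_inst=True):
--     '''
--     Obtain all instrument in the input remi sequence
--     Return a list of instrument tokens
--     Sort by program id
--     '''
--     inst = set()
--     for token in remi_seq:
--         if token.startswith("i-"):
--             inst.add(token)
--     inst = list(inst)
--
--     if sort_inst:
--         inst = sorted(inst, key=lambda x: int(x.split("-")[1]))  # sort by inst id
--
--     return inst
--
-- def from_remi_get_pos_per_track_dict(remi_seq, remi_reordered=False):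
--     '''
--     Get the position token of each instrument
--     '''
--     insts = from_remi_get_insts(remi_seq)
--     pos_of_track = {inst: [] for inst in insts}
--
--     if remi_reordered is True: # Reorder seems to be always false during the feature extraction phase. Only applied after augmentation
--         cur_inst = None
--         for tok in remi_seq:
--             if tok.startswith('i-'):
--                 cur_inst = tok
--             elif tok.startswith('o-'):
--                 cur_inst = insts[0] if cur_inst is None else cur_inst
--                 pos_of_track[cur_inst].append(tok)
--     else:
--         cur_pos = None
--         prev_pos, prev_inst = None, None
--         for tok in remi_seq:
--             if tok.startswith('o-'):
--                 cur_pos = tok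
--             elif tok.startswith('i-'):
--                 cur_inst = tok
--
--                 if cur_pos != prev_pos or cur_inst != prev_inst:
--                     pos_of_track[cur_inst].append(cur_pos)
--                     prev_pos = cur_pos
--                     prev_inst = cur_inst
--
--
--     return pos_of_track
-- ===== SOURCE B (Python) =====
-- def from_remi_get_pos_per_track_dict(remi_seq, remi_reordered=False):
--     '''
--     Get the position token of each instrument.
--     Staged pipeline: annotate every index with the position/instrument in
--     effect there, project the annotated stream into an event list, drop
--     events equal to their predecessor by index comparison, then build the
--     result as a per-instrument grouping comprehension (no stateful
--     distribution into a dict).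
--     '''
--     insts = sorted({t for t in remi_seq if t.startswith("i-")},
--                    key=lambda x: int(x.split("-")[1]))
--
--     if remi_reordered is True:
--         # annotate each index with the most recent 'i-' token (None before the first)
--         inst_at = []
--         cur = None
--         for t in remi_seq:
--             if t.startswith('i-'):
--                 cur = t
--             inst_at.append(cur)
--         return {inst: [t for t, ci in zip(remi_seq, inst_at)
--                        if t.startswith('o-')
--                        and (insts[0] if ci is None else ci) == inst]
--                 for inst in insts}
--     else:
--         # annotate each index with the most recent 'o-' token (None before the first)
--         pos_at = []
--         cur = None
--         for t in remi_seq: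
--             if t.startswith('o-'):
--                 cur = t
--             pos_at.append(cur)
--         events = [(p, t) for t, p in zip(remi_seq, pos_at) if t.startswith('i-')]
--         keep = [e for j, e in enumerate(events) if j == 0 or e != events[j - 1]]
--         return {inst: [p for p, i in keep if i == inst] for inst in insts}
-- ===== Notes on version B (the rewrite author's own statement) =====
-- stated objective: alternative
-- what changed: A's single fused stateful loop that mutates a pre-built dict in place (cur_pos/prev_pos/prev_inst state, appends as it scans) is replaced by a staged pipeline: annotate every index with the position (resp. instrument) in effect there, project the annotated stream into an event list via zip, drop events equal to their predecessor by index comparison, and build the result as a per-instrument grouping comprehension that filters the surviving events once per instrument.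
-- outside the precondition, e.g. on from_remi_get_pos_per_track_dict(['i-7'], False): A returns {'i-7': [None]}, B returns {'i-7': [None]}
import Mathlib
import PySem

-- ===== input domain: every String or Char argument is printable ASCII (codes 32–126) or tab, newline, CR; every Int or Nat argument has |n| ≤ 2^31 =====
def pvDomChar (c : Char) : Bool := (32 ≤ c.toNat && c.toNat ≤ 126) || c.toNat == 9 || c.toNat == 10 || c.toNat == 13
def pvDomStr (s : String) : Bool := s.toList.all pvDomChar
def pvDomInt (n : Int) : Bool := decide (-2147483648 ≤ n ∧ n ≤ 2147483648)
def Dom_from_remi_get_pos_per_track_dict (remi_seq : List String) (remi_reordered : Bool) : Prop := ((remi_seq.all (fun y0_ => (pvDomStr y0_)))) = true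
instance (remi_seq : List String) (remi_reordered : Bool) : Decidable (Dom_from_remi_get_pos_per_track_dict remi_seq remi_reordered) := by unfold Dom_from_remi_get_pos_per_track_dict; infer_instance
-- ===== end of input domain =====

-- B replaces A's fused stateful loop (which mutates a pre-built dict while scanning) by a staged
-- pipeline: annotate each index with the position/instrument in effect, project to an event list,
-- drop events equal to their predecessor by index comparison, then group per instrument by
-- filtering; objective: alternative decomposition, same cost.

-- ===== PORT A =====
def pvStartsI (t : String) : Bool := PySem.Str.startswith t "i-"
def pvStartsO (t : String) : Bool := PySem.Str.startswith t "o-"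
-- int(x.split("-")[1]); the .getD defaults sit exactly where Python raises (IndexError/ValueError), excluded by Pre_
def pvInstKey (x : String) : Int := (PySem.Int.ofStr? ((PySem.List.pyGet? ((PySem.Str.split? x "-").getD []) 1).getD "")).getD 0

def from_remi_get_insts (remi_seq : List String) (sort_inst : Bool) : List String :=
  let inst : PySem.Set String :=
    remi_seq.foldl (fun s token => if pvStartsI token then PySem.Set.add s token else s) PySem.Set.empty
  if sort_inst then PySem.List.sorted inst pvInstKey else inst

-- reordered loop body of A: state (cur_inst, pos_of_track)
def pvStepAR (insts : List String) (st : Option String × PySem.Dict String (List String)) (tok : String) :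
    Option String × PySem.Dict String (List String) :=
  if pvStartsI tok then (some tok, st.2)
  else if pvStartsO tok then
    let ci := st.1.getD ((PySem.List.pyGet? insts 0).getD "")   -- insts[0] if cur_inst is None else cur_inst (IndexError excluded by Pre_)
    (some ci, st.2.modify ci [] (· ++ [tok]))
  else st

-- non-reordered loop body of A: state (cur_pos, prev_pos, prev_inst, pos_of_track);
-- the appended cur_pos is an Option; Pre_ excludes the inputs where Python would append None, so .getD "" is never hit there
def pvStepAN (st : Option String × Option String × Option String × PySem.Dict String (List String)) (tok : String) :
    Option String × Option String × Option String × PySem.Dict String (List String) :=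
  if pvStartsO tok then (some tok, st.2.1, st.2.2.1, st.2.2.2)
  else if pvStartsI tok then
    if st.1 != st.2.1 || some tok != st.2.2.1 then
      (st.1, st.1, some tok, st.2.2.2.modify tok [] (· ++ [st.1.getD ""]))
    else st
  else st

def from_remi_get_pos_per_track_dict (remi_seq : List String) (remi_reordered : Bool) : List (String × List String) :=
  let insts := from_remi_get_insts remi_seq true
  let d0 : PySem.Dict String (List String) := insts.foldl (fun d i => d.insert i []) PySem.Dict.empty
  if remi_reordered then
    ((remi_seq.foldl (pvStepAR insts) (none, d0)).2).items
  else
    ((remi_seq.foldl pvStepAN (none, none, none, d0)).2.2.2).items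

-- ===== PORT B =====
-- annotation pass of B: the most recent 'i-' token at each index (None before the first)
def pvAnnStepI (st : Option String × List (Option String)) (t : String) :
    Option String × List (Option String) :=
  let c := if pvStartsI t then some t else st.1
  (c, st.2 ++ [c])

-- annotation pass of B: the most recent 'o-' token at each index (None before the first)
def pvAnnStepO (st : Option String × List (Option String)) (t : String) :
    Option String × List (Option String) :=
  let c := if pvStartsO t then some t else st.1
  (c, st.2 ++ [c])

def from_remi_get_pos_per_track_dict_alt (remi_seq : List String) (remi_reordered : Bool) : List (String × List String) :=
  let insts := PySem.List.sorted (PySem.Set.ofList (remi_seq.filter pvStartsI)) pvInstKey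
  if remi_reordered then
    let inst_at := (remi_seq.foldl pvAnnStepI (none, [])).2
    insts.map (fun inst => (inst,
      ((remi_seq.zip inst_at).filter (fun p =>
        pvStartsO p.1 && (p.2.getD ((PySem.List.pyGet? insts 0).getD "") == inst))).map (·.1)))
  else
    let pos_at := (remi_seq.foldl pvAnnStepO (none, [])).2
    let events := ((remi_seq.zip pos_at).filter (fun p => pvStartsI p.1)).map (fun p => (p.2, p.1))
    let keep := ((PySem.List.enumerate events).filter (fun je =>
        je.1 == 0 || some je.2 != PySem.List.pyGet? events (je.1 - 1))).map (·.2)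
    insts.map (fun inst => (inst,
      (keep.filter (fun e => e.2 == inst)).map (fun e => e.1.getD "")))

-- ===== PRECONDITION & SPEC =====
-- Pre_ excludes exactly: (a) an 'i-' token whose id part int() cannot parse (Python ValueError in the sort key);
-- (b) two distinct 'i-' tokens with the same parsed id (their relative order in the result is Python set/hash order,
--     an accident no one would specify); (c) with remi_reordered an 'o-' token but no 'i-' token (IndexError on insts[0]);
-- (d) without remi_reordered an 'i-' token before the first 'o-' token (Python appends None, not a str, to the list).
def Pre_from_remi_get_pos_per_track_dict (remi_seq : List String) (remi_reordered : Bool) : Prop :=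
  (∀ t ∈ remi_seq, pvStartsI t = true →
      (PySem.Int.ofStr? ((PySem.List.pyGet? ((PySem.Str.split? t "-").getD []) 1).getD "")).isSome = true) ∧
  (∀ t₁ ∈ remi_seq, ∀ t₂ ∈ remi_seq, pvStartsI t₁ = true → pvStartsI t₂ = true →
      pvInstKey t₁ = pvInstKey t₂ → t₁ = t₂) ∧
  (if remi_reordered then (remi_seq.any pvStartsI = true ∨ remi_seq.any pvStartsO = false)
   else (remi_seq.takeWhile (fun t => !pvStartsO t)).all (fun t => !pvStartsI t) = true)
instance (remi_seq : List String) (remi_reordered : Bool) : Decidable (Pre_from_remi_get_pos_per_track_dict remi_seq remi_reordered) := by unfold Pre_from_remi_get_pos_per_track_dict; infer_instance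

def pvWitness_from_remi_get_pos_per_track_dict : List String × Bool := (["o-0", "i-1", "o-4", "i-1", "i-2"], false)

def Spec_from_remi_get_pos_per_track_dict (remi_seq : List String) (remi_reordered : Bool) (out : List (String × List String)) : Prop := out = from_remi_get_pos_per_track_dict_alt remi_seq remi_reordered
instance (remi_seq : List String) (remi_reordered : Bool) (out : List (String × List String)) : Decidable (Spec_from_remi_get_pos_per_track_dict remi_seq remi_reordered out) := by unfold Spec_from_remi_get_pos_per_track_dict; infer_instance

-- ===== CLAIM (what is proved, stated in full; the proofs are below) =====
def Claim_equal_from_remi_get_pos_per_track_dict : Prop := ∀ (remi_seq : List String) (remi_reordered : Bool), Dom_from_remi_get_pos_per_track_dict remi_seq remi_reordered → Pre_from_remi_get_pos_per_track_dict remi_seq remi_reordered → Spec_from_remi_get_pos_per_track_dict remi_seq remi_reordered (from_remi_get_pos_per_track_dict remi_seq remi_reordered)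

-- ===== LEMMAS AND PROOFS =====

-- a token starting with "o-" does not start with "i-", and conversely
lemma pv_excl (t : String) (h : pvStartsO t = true) : pvStartsI t = false := by
  simp only [pvStartsO, pvStartsI, PySem.Str.startswith, PySem.Chars.startswith] at *
  rw [List.isPrefixOf_iff_prefix, show ("o-".toList) = ['o', '-'] from rfl] at h
  rcases h with ⟨s, hs⟩
  rw [show ("i-".toList) = ['i', '-'] from rfl, ← hs, List.cons_append]
  simp only [List.isPrefixOf, Bool.and_eq_true, beq_iff_eq]
  simp

lemma pv_excl' (t : String) (h : pvStartsI t = true) : pvStartsO t = false := by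
  simp only [pvStartsO, pvStartsI, PySem.Str.startswith, PySem.Chars.startswith] at *
  rw [List.isPrefixOf_iff_prefix, show ("i-".toList) = ['i', '-'] from rfl] at h
  rcases h with ⟨s, hs⟩
  rw [show ("o-".toList) = ['o', '-'] from rfl, ← hs, List.cons_append]
  simp only [List.isPrefixOf, Bool.and_eq_true, beq_iff_eq]
  simp

-- the instrument lists of the two ports coincide
lemma pv_insts_eq (remi_seq : List String) :
    from_remi_get_insts remi_seq true
      = PySem.List.sorted (PySem.Set.ofList (remi_seq.filter pvStartsI)) pvInstKey := by
  simp [from_remi_get_insts, PySem.List.foldl_if_eq_foldl_filter, PySem.Set.ofList_eq_foldl,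
    PySem.Set.empty]

-- recursive form of B's annotation passes
def pvAnnI (cp : Option String) : List String → List (Option String)
  | [] => []
  | t :: r => let c := if pvStartsI t then some t else cp
              c :: pvAnnI c r

def pvAnnO (cp : Option String) : List String → List (Option String)
  | [] => []
  | t :: r => let c := if pvStartsO t then some t else cp
              c :: pvAnnO c r

lemma pv_annI_foldl : ∀ (l : List String) (cp : Option String) (acc : List (Option String)),
    (l.foldl pvAnnStepI (cp, acc)).2 = acc ++ pvAnnI cp l := by
  intro l
  induction l with
  | nil => intro cp acc; simp [pvAnnI]
  | cons t r ih =>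
    intro cp acc
    simp only [List.foldl_cons, pvAnnStepI, pvAnnI]
    rw [ih]
    simp

lemma pv_annO_foldl : ∀ (l : List String) (cp : Option String) (acc : List (Option String)),
    (l.foldl pvAnnStepO (cp, acc)).2 = acc ++ pvAnnO cp l := by
  intro l
  induction l with
  | nil => intro cp acc; simp [pvAnnO]
  | cons t r ih =>
    intro cp acc
    simp only [List.foldl_cons, pvAnnStepO, pvAnnO]
    rw [ih]
    simp

-- events extracted by the rest of the sequence, given the current position
def pvEvents (cp : Option String) : List String → List (Option String × String)
  | [] => []
  | t :: r =>
    if pvStartsO t then pvEvents (some t) r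
    else if pvStartsI t then (cp, t) :: pvEvents cp r
    else pvEvents cp r

-- B's zip-projection computes exactly those events
lemma pv_eventsB : ∀ (l : List String) (cp : Option String),
    ((l.zip (pvAnnO cp l)).filter (fun p => pvStartsI p.1)).map (fun p => (p.2, p.1))
      = pvEvents cp l := by
  intro l
  induction l with
  | nil => intro cp; simp [pvAnnO, pvEvents]
  | cons t r ih =>
    intro cp
    by_cases ho : pvStartsO t = true
    · have hi := pv_excl t ho
      simp only [pvAnnO, pvEvents, ho, hi, if_true, Bool.false_eq_true, if_false]
      simp only [List.zip_cons_cons, List.filter_cons, hi, Bool.false_eq_true, if_false]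
      exact ih (some t)
    · by_cases hi : pvStartsI t = true
      · simp only [pvAnnO, pvEvents, ho, hi, Bool.false_eq_true, if_false, if_true]
        simp only [List.zip_cons_cons, List.filter_cons, hi, if_true, List.map_cons]
        rw [ih cp]
      · simp only [pvAnnO, pvEvents, ho, hi, Bool.false_eq_true, if_false]
        simp only [List.zip_cons_cons, List.filter_cons, hi, Bool.false_eq_true, if_false]
        exact ih cp

-- adjacent-duplicate collapse, recursively, given the previous event
def pvDedup (prev : Option (Option String × String)) :
    List (Option String × String) → List (Option String × String)
  | [] => []
  | e :: es => if some e = prev then pvDedup prev es else e :: pvDedup (some e) es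

-- B's index-comparison filter is the adjacent-duplicate collapse
lemma pv_idx_dedup (evs : List (Option String × String)) :
    ∀ (l pre : List (Option String × String)), pre ++ l = evs →
    ((PySem.List.enumerate l (pre.length : Int)).filter (fun je =>
        je.1 == 0 || some je.2 != PySem.List.pyGet? evs (je.1 - 1))).map (·.2)
      = pvDedup pre.getLast? l := by
  intro l
  induction l with
  | nil => intro pre h; simp [pvDedup, PySem.List.enumerate]
  | cons e es ih =>
    intro pre h
    rw [PySem.List.enumerate_cons, List.filter_cons]
    rcases List.eq_nil_or_concat' pre with hpre | ⟨p', a, hpre⟩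
    · subst hpre
      have hcond : ((((([] : List (Option String × String)).length : Int)) == 0
          || some e != PySem.List.pyGet? evs ((((([] : List (Option String × String)).length : Int))) - 1)) = true) := by
        simp
      rw [hcond]
      simp only [if_true, List.map_cons]
      have hstep : (((([] : List (Option String × String)).length : Int)) + 1)
          = ((([e] : List (Option String × String)).length : Int)) := by simp
      rw [hstep, ih [e] (by simpa using h)]
      simp [pvDedup]
    · subst hpre
      have hfirst : (((((p' ++ [a]).length : Int)) == 0) = false) := by
        simp only [beq_eq_false_iff_ne, ne_eq, Nat.cast_eq_zero]
        simp
      have hget : PySem.List.pyGet? evs (((p' ++ [a]).length : Int) - 1) = some a := by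
        have h1 : (((p' ++ [a]).length : Int) - 1) = ((p'.length : Nat) : Int) := by
          simp
        rw [h1, PySem.List.pyGet?_natCast, ← h]
        rw [List.getElem?_append_left (by simp)]
        simp
      have hlast : (p' ++ [a]).getLast? = some a := List.getLast?_concat
      rw [hget, hlast]
      have hstep : (((p' ++ [a]).length : Int) + 1) = ((((p' ++ [a]) ++ [e]).length : Int)) := by
        simp only [List.length_append, List.length_cons, List.length_nil]
        omega
      by_cases heq : e = a
      · subst heq
        have hcond : ((((p' ++ [e]).length : Int) == 0 || some e != some e) = false) := by
          rw [Bool.or_eq_false_iff]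
          exact ⟨hfirst, by simp⟩
        rw [hcond]
        simp only [Bool.false_eq_true, if_false]
        rw [hstep, ih ((p' ++ [e]) ++ [e]) (by simpa using h)]
        simp [pvDedup, List.getLast?_concat]
      · have hcond : ((((p' ++ [a]).length : Int) == 0 || some e != some a) = true) := by
          simp [heq]
        rw [hcond]
        simp only [if_true, List.map_cons]
        rw [hstep, ih ((p' ++ [a]) ++ [e]) (by simpa using h)]
        simp [pvDedup, List.getLast?_concat, heq]

def pvAppendOp (d : PySem.Dict String (List String)) (e : Option String × String) :
    PySem.Dict String (List String) := d.modify e.2 [] (· ++ [e.1.getD ""])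

-- prev_pos / prev_inst of A's fused loop, as a function of the last emitted event
def pvPrevPos (prev : Option (Option String × String)) : Option String := prev.elim none (·.1)
def pvPrevInst (prev : Option (Option String × String)) : Option String := prev.elim none (fun e => some e.2)

-- A's fused non-reordered loop = fold of appends over the collapsed event list
lemma pv_fused : ∀ (l : List String) (cp : Option String)
    (prev : Option (Option String × String)) (d : PySem.Dict String (List String)),
    (l.foldl pvStepAN (cp, pvPrevPos prev, pvPrevInst prev, d)).2.2.2
      = (pvDedup prev (pvEvents cp l)).foldl pvAppendOp d := by
  intro l
  induction l with
  | nil => intro cp prev d; simp [pvEvents, pvDedup]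
  | cons t r ih =>
    intro cp prev d
    simp only [List.foldl_cons, pvStepAN, pvEvents]
    cases ho : pvStartsO t with
    | true =>
      simp only [if_true]
      exact ih (some t) prev d
    | false =>
      simp only [Bool.false_eq_true, if_false]
      cases hi : pvStartsI t with
      | false =>
        simp only [Bool.false_eq_true, if_false]
        exact ih cp prev d
      | true =>
        simp only [if_true]
        have hcond : ((cp != pvPrevPos prev || some t != pvPrevInst prev) = true)
            ↔ some ((cp, t) : Option String × String) ≠ prev := by
          cases prev with
          | none => simp [pvPrevPos, pvPrevInst]
          | some e =>
            cases e with
            | mk p i =>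
              simp only [pvPrevPos, pvPrevInst, Option.elim, Bool.or_eq_true, bne_iff_ne,
                ne_eq, Option.some.injEq, Prod.mk.injEq, not_and]
              tauto
        by_cases hc : some ((cp, t) : Option String × String) = prev
        · have hfalse : (cp != pvPrevPos prev || some t != pvPrevInst prev) = false := by
            by_cases hx : (cp != pvPrevPos prev || some t != pvPrevInst prev) = true
            · exact (hcond.mp hx hc).elim
            · exact Bool.eq_false_iff.mpr hx
          rw [hfalse]
          simp only [Bool.false_eq_true, if_false]
          rw [show pvDedup prev ((cp, t) :: pvEvents cp r) = pvDedup prev (pvEvents cp r) from by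
            simp [pvDedup, hc]]
          exact ih cp prev d
        · have htrue : (cp != pvPrevPos prev || some t != pvPrevInst prev) = true := hcond.mpr hc
          rw [htrue]
          simp only [if_true]
          rw [show pvDedup prev ((cp, t) :: pvEvents cp r)
              = (cp, t) :: pvDedup (some (cp, t)) (pvEvents cp r) from by simp [pvDedup, hc]]
          rw [List.foldl_cons]
          have := ih cp (some (cp, t)) (pvAppendOp d (cp, t))
          simpa [pvPrevPos, pvPrevInst, pvAppendOp] using this

-- reordered events: (position token, effective instrument) per 'o-' token
def pvEventsR (i0 : String) : Option String → List String → List (String × String)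
  | _, [] => []
  | cur, t :: r =>
    if pvStartsI t then pvEventsR i0 (some t) r
    else if pvStartsO t then (t, cur.getD i0) :: pvEventsR i0 cur r
    else pvEventsR i0 cur r

-- A's reordered loop = fold of appends over the reordered events (writing the effective
-- instrument back into cur does not change any later effective instrument)
lemma pv_loopR (i0 : String) (insts : List String) (hi0 : (PySem.List.pyGet? insts 0).getD "" = i0) :
    ∀ (l : List String) (cA cur : Option String) (d : PySem.Dict String (List String)),
    cA.getD i0 = cur.getD i0 →
    (l.foldl (pvStepAR insts) (cA, d)).2
      = (pvEventsR i0 cur l).foldl (fun d e => d.modify e.2 [] (· ++ [e.1])) d := by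
  intro l
  induction l with
  | nil => intro cA cur d h; simp [pvEventsR]
  | cons t r ih =>
    intro cA cur d h
    simp only [List.foldl_cons, pvStepAR, pvEventsR]
    by_cases hi : pvStartsI t = true
    · simp only [hi, if_true]
      exact ih _ _ _ rfl
    · by_cases ho : pvStartsO t = true
      · simp only [hi, ho, Bool.false_eq_true, if_false, if_true, hi0, h, List.foldl_cons]
        exact ih _ _ _ rfl
      · simp only [hi, ho, Bool.false_eq_true, if_false]
        exact ih _ _ _ h

-- B's reordered zip-projection, filtered at one instrument, = the reordered events there
lemma pv_eventsRB (i0 : String) (inst : String) : ∀ (l : List String) (cp : Option String),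
    ((l.zip (pvAnnI cp l)).filter (fun p => pvStartsO p.1 && (p.2.getD i0 == inst))).map (·.1)
      = ((pvEventsR i0 cp l).filter (fun e => e.2 == inst)).map (·.1) := by
  intro l
  induction l with
  | nil => intro cp; simp [pvAnnI, pvEventsR]
  | cons t r ih =>
    intro cp
    simp only [pvAnnI, pvEventsR]
    by_cases hi : pvStartsI t = true
    · have ho := pv_excl' t hi
      simp only [hi, ho, if_true, List.zip_cons_cons, List.filter_cons]
      simp only [ho, Bool.false_and, Bool.false_eq_true, if_false]
      exact ih (some t)
    · simp only [hi, Bool.false_eq_true, if_false, List.zip_cons_cons, List.filter_cons]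
      by_cases ho : pvStartsO t = true
      · simp only [ho, if_true, Bool.true_and, List.filter_cons]
        by_cases hb : (cp.getD i0 == inst) = true
        · simp only [hb, if_true, List.map_cons]
          rw [ih cp]
        · simp only [hb, Bool.false_eq_true, if_false]
          exact ih cp
      · simp only [ho, Bool.false_and, Bool.false_eq_true, if_false]
        exact ih cp

-- grouping: a modify-append fold over pairs whose keys all lie in the (duplicate-free) key list
-- of the initial dict has, as items, one group per key, in key order
lemma pv_items_group (insts : List String) (hnd : insts.Nodup)
    (m : List (String × String)) (hmem : ∀ p ∈ m, p.1 ∈ insts) :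
    (m.foldl (fun d p => d.modify p.1 [] (· ++ [p.2]))
        (insts.foldl (fun d i => d.insert i ([] : List String)) PySem.Dict.empty)).items
      = insts.map (fun i => (i, (m.filter (fun p => p.1 == i)).map (·.2))) := by
  have hd0 : (insts.foldl (fun d i => d.insert i ([] : List String)) PySem.Dict.empty).items
      = insts.map (fun i => (i, ([] : List String))) := by
    have h := PySem.Dict.items_foldl_insert_fresh insts (fun i => i)
      (fun _ => ([] : List String)) PySem.Dict.empty
      (by intro a _; simp [PySem.Dict.contains_empty]) (by simpa using hnd)
    simpa using h
  have hkeys0 : (insts.foldl (fun d i => d.insert i ([] : List String)) PySem.Dict.empty).keys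
      = insts := by
    simp [PySem.Dict.keys, hd0, Function.comp_def]
  have hnd0 : (insts.foldl (fun d i => d.insert i ([] : List String)) PySem.Dict.empty).keys.Nodup := by
    rw [hkeys0]; exact hnd
  have hkeysf : (m.foldl (fun d p => d.modify p.1 [] (· ++ [p.2]))
        (insts.foldl (fun d i => d.insert i ([] : List String)) PySem.Dict.empty)).keys
      = insts := by
    have h := PySem.Dict.keys_foldl_modify_key m (fun p => p.1) ([] : List String)
      (fun _ p => (· ++ [p.2])) (insts.foldl (fun d i => d.insert i ([] : List String)) PySem.Dict.empty)
    rw [h, hkeys0, PySem.Set.update_eq_append_filter]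
    have hfil : (PySem.Set.ofList (m.map (fun p => p.1))).filter
        (fun y => !(PySem.Set.contains insts y)) = [] := by
      rw [List.filter_eq_nil_iff]
      intro y hy
      rw [PySem.Set.mem_ofList] at hy
      rcases List.mem_map.mp hy with ⟨p, hp, rfl⟩
      simp [PySem.Set.contains_iff]
      exact hmem p hp
    rw [hfil, List.append_nil]
  have hndf : (m.foldl (fun d p => d.modify p.1 [] (· ++ [p.2]))
        (insts.foldl (fun d i => d.insert i ([] : List String)) PySem.Dict.empty)).keys.Nodup := by
    exact PySem.Dict.nodup_keys_foldl_modify_key m (fun p => p.1) ([] : List String)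
      (fun _ p => (· ++ [p.2])) _ hnd0
  rw [PySem.Dict.items_eq_map_keys _ hndf ([] : List String), hkeysf]
  refine List.map_congr_left ?_
  intro i hi
  have hgd : (m.foldl (fun d p => d.modify p.1 [] (· ++ [p.2]))
        (insts.foldl (fun d i => d.insert i ([] : List String)) PySem.Dict.empty)).getD i []
      = (insts.foldl (fun d i => d.insert i ([] : List String)) PySem.Dict.empty).getD i []
        ++ (m.filter (fun p => p.1 == i)).map (·.2) :=
    PySem.Dict.getD_foldl_modify_append m _ i
  have hg0 : (insts.foldl (fun d i => d.insert i ([] : List String)) PySem.Dict.empty).getD i []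
      = ([] : List String) := by
    have hmemit : (i, ([] : List String)) ∈
        (insts.foldl (fun d i => d.insert i ([] : List String)) PySem.Dict.empty).items := by
      rw [hd0]
      exact List.mem_map.mpr ⟨i, hi, rfl⟩
    exact PySem.Dict.getD_of_mem_items _ hmemit hnd0 []
  rw [hgd, hg0, List.nil_append]

-- membership facts
lemma pv_mem_events : ∀ (l : List String) (cp : Option String) (e : Option String × String),
    e ∈ pvEvents cp l → e.2 ∈ l ∧ pvStartsI e.2 = true := by
  intro l
  induction l with
  | nil => intro cp e h; simp [pvEvents] at h
  | cons t r ih =>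
    intro cp e h
    simp only [pvEvents] at h
    by_cases ho : pvStartsO t = true
    · rw [if_pos ho] at h
      rcases ih (some t) e h with ⟨h1, h2⟩
      exact ⟨List.mem_cons_of_mem _ h1, h2⟩
    · rw [if_neg (by simp [ho])] at h
      by_cases hi : pvStartsI t = true
      · rw [if_pos hi] at h
        rcases List.mem_cons.mp h with rfl | h'
        · exact ⟨List.mem_cons_self, hi⟩
        · rcases ih cp e h' with ⟨h1, h2⟩
          exact ⟨List.mem_cons_of_mem _ h1, h2⟩
      · rw [if_neg (by simp [hi])] at h
        rcases ih cp e h with ⟨h1, h2⟩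
        exact ⟨List.mem_cons_of_mem _ h1, h2⟩

lemma pv_mem_dedup : ∀ (l : List (Option String × String)) (prev : Option (Option String × String))
    (e : Option String × String), e ∈ pvDedup prev l → e ∈ l := by
  intro l
  induction l with
  | nil => intro prev e h; simp [pvDedup] at h
  | cons x xs ih =>
    intro prev e h
    simp only [pvDedup] at h
    by_cases hx : some x = prev
    · rw [if_pos hx] at h
      exact List.mem_cons_of_mem _ (ih prev e h)
    · rw [if_neg hx] at h
      rcases List.mem_cons.mp h with rfl | h'
      · exact List.mem_cons_self
      · exact List.mem_cons_of_mem _ (ih (some x) e h')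

lemma pv_mem_eventsR (i0 : String) (S : List String) (hi0 : i0 ∈ S) :
    ∀ (l : List String) (cur : Option String), (∀ x, cur = some x → x ∈ S) →
    (∀ t ∈ l, pvStartsI t = true → t ∈ S) →
    ∀ e ∈ pvEventsR i0 cur l, e.2 ∈ S := by
  intro l
  induction l with
  | nil => intro cur _ _ e h; simp [pvEventsR] at h
  | cons t r ih =>
    intro cur hcur hS e h
    simp only [pvEventsR] at h
    by_cases hi : pvStartsI t = true
    · rw [if_pos hi] at h
      exact ih (some t) (by intro x hx; injection hx with hx; exact hx ▸ hS t List.mem_cons_self hi)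
        (fun u hu => hS u (List.mem_cons_of_mem _ hu)) e h
    · rw [if_neg (by simp [hi])] at h
      by_cases ho : pvStartsO t = true
      · rw [if_pos ho] at h
        rcases List.mem_cons.mp h with rfl | h'
        · cases cur with
          | none => simpa using hi0
          | some x => simpa using hcur x rfl
        · exact ih cur hcur (fun u hu => hS u (List.mem_cons_of_mem _ hu)) e h'
      · rw [if_neg (by simp [ho])] at h
        exact ih cur hcur (fun u hu => hS u (List.mem_cons_of_mem _ hu)) e h

lemma pv_eventsR_nil_of_no_o (i0 : String) :
    ∀ (l : List String) (cur : Option String), (∀ t ∈ l, pvStartsO t = false) →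
    pvEventsR i0 cur l = [] := by
  intro l
  induction l with
  | nil => intro cur _; simp [pvEventsR]
  | cons t r ih =>
    intro cur hno
    simp only [pvEventsR]
    by_cases hi : pvStartsI t = true
    · rw [if_pos hi]
      exact ih (some t) (fun u hu => hno u (List.mem_cons_of_mem _ hu))
    · rw [if_neg (by simp [hi]), if_neg (by simp [hno t List.mem_cons_self])]
      exact ih cur (fun u hu => hno u (List.mem_cons_of_mem _ hu))

-- every 'i-' token of the sequence is in the sorted instrument list
lemma pv_mem_insts (remi_seq : List String) (t : String) (ht : t ∈ remi_seq)
    (hi : pvStartsI t = true) :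
    t ∈ PySem.List.sorted (PySem.Set.ofList (remi_seq.filter pvStartsI)) pvInstKey := by
  rw [PySem.List.mem_sorted, PySem.Set.mem_ofList]
  exact List.mem_filter.mpr ⟨ht, hi⟩

lemma pv_insts_nodup (remi_seq : List String) :
    (PySem.List.sorted (PySem.Set.ofList (remi_seq.filter pvStartsI)) pvInstKey).Nodup := by
  exact (PySem.List.sorted_perm _ _ _).symm.nodup (PySem.Set.nodup_ofList _)

-- ===== VERDICT (by name: the statement is the Claim_ definition above) =====
theorem from_remi_get_pos_per_track_dict_spec : Claim_equal_from_remi_get_pos_per_track_dict := by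
  intro remi_seq remi_reordered _ hpre
  unfold Spec_from_remi_get_pos_per_track_dict
  obtain ⟨-, -, hbr⟩ := hpre
  cases remi_reordered with
  | false =>
    simp only [Bool.false_eq_true, if_false] at hbr
    simp only [from_remi_get_pos_per_track_dict, from_remi_get_pos_per_track_dict_alt,
      pv_insts_eq, Bool.false_eq_true, if_false]
    rw [pv_annO_foldl remi_seq none [], List.nil_append, pv_eventsB remi_seq none]
    have hkeep : ((PySem.List.enumerate (pvEvents none remi_seq)).filter (fun je =>
        je.1 == 0 || some je.2 != PySem.List.pyGet? (pvEvents none remi_seq) (je.1 - 1))).map (·.2)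
        = pvDedup none (pvEvents none remi_seq) := by
      have h := pv_idx_dedup (pvEvents none remi_seq) (pvEvents none remi_seq) [] rfl
      simpa using h
    rw [hkeep]
    have hA : (remi_seq.foldl pvStepAN (none, none, none,
        ((PySem.List.sorted (PySem.Set.ofList (remi_seq.filter pvStartsI)) pvInstKey).foldl
          (fun d i => d.insert i []) PySem.Dict.empty))).2.2.2
        = (pvDedup none (pvEvents none remi_seq)).foldl pvAppendOp
          ((PySem.List.sorted (PySem.Set.ofList (remi_seq.filter pvStartsI)) pvInstKey).foldl
            (fun d i => d.insert i []) PySem.Dict.empty) :=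
      pv_fused remi_seq none none _
    rw [hA]
    have hfold : (pvDedup none (pvEvents none remi_seq)).foldl pvAppendOp
          ((PySem.List.sorted (PySem.Set.ofList (remi_seq.filter pvStartsI)) pvInstKey).foldl
            (fun d i => d.insert i []) PySem.Dict.empty)
        = ((pvDedup none (pvEvents none remi_seq)).map (fun e => (e.2, e.1.getD ""))).foldl
            (fun d p => d.modify p.1 [] (· ++ [p.2]))
            ((PySem.List.sorted (PySem.Set.ofList (remi_seq.filter pvStartsI)) pvInstKey).foldl
              (fun d i => d.insert i []) PySem.Dict.empty) := by
      rw [List.foldl_map]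
      try rfl
    rw [hfold]
    rw [pv_items_group _ (pv_insts_nodup remi_seq) _ ?hmem]
    case hmem =>
      intro p hp
      rcases List.mem_map.mp hp with ⟨e, he, rfl⟩
      have he' := pv_mem_dedup _ _ _ he
      rcases pv_mem_events remi_seq none e he' with ⟨h1, h2⟩
      exact pv_mem_insts remi_seq e.2 h1 h2
    refine List.map_congr_left ?_
    intro i _
    rw [List.filter_map, List.map_map]
    congr 1
  | true =>
    simp only [if_true] at hbr
    simp only [from_remi_get_pos_per_track_dict, from_remi_get_pos_per_track_dict_alt,
      pv_insts_eq, if_true]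
    rw [pv_annI_foldl remi_seq none [], List.nil_append]
    have hA : (remi_seq.foldl (pvStepAR
        (PySem.List.sorted (PySem.Set.ofList (remi_seq.filter pvStartsI)) pvInstKey))
        (none, ((PySem.List.sorted (PySem.Set.ofList (remi_seq.filter pvStartsI)) pvInstKey).foldl
          (fun d i => d.insert i []) PySem.Dict.empty))).2
        = (pvEventsR ((PySem.List.pyGet?
            (PySem.List.sorted (PySem.Set.ofList (remi_seq.filter pvStartsI)) pvInstKey) 0).getD "")
            none remi_seq).foldl (fun d e => d.modify e.2 [] (· ++ [e.1]))
          ((PySem.List.sorted (PySem.Set.ofList (remi_seq.filter pvStartsI)) pvInstKey).foldl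
            (fun d i => d.insert i []) PySem.Dict.empty) :=
      pv_loopR _ _ rfl remi_seq none none _ rfl
    rw [hA]
    have hfold : (pvEventsR ((PySem.List.pyGet?
            (PySem.List.sorted (PySem.Set.ofList (remi_seq.filter pvStartsI)) pvInstKey) 0).getD "")
            none remi_seq).foldl (fun d e => d.modify e.2 [] (· ++ [e.1]))
          ((PySem.List.sorted (PySem.Set.ofList (remi_seq.filter pvStartsI)) pvInstKey).foldl
            (fun d i => d.insert i []) PySem.Dict.empty)
        = ((pvEventsR ((PySem.List.pyGet?
            (PySem.List.sorted (PySem.Set.ofList (remi_seq.filter pvStartsI)) pvInstKey) 0).getD "")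
            none remi_seq).map (fun e => (e.2, e.1))).foldl
            (fun d p => d.modify p.1 [] (· ++ [p.2]))
            ((PySem.List.sorted (PySem.Set.ofList (remi_seq.filter pvStartsI)) pvInstKey).foldl
              (fun d i => d.insert i []) PySem.Dict.empty) := by
      rw [List.foldl_map]
      try rfl
    rw [hfold]
    rw [pv_items_group _ (pv_insts_nodup remi_seq) _ ?hmemR]
    case hmemR =>
      intro p hp
      rcases List.mem_map.mp hp with ⟨e, he, rfl⟩
      rcases hbr with hI | hO
      · rcases List.any_eq_true.mp hI with ⟨t, ht, hti⟩
        have htmem := pv_mem_insts remi_seq t ht hti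
        rcases List.exists_cons_of_ne_nil (List.ne_nil_of_mem htmem) with ⟨h0, tl, hins⟩
        have hi0 : ((PySem.List.pyGet?
            (PySem.List.sorted (PySem.Set.ofList (remi_seq.filter pvStartsI)) pvInstKey) 0).getD "")
            ∈ PySem.List.sorted (PySem.Set.ofList (remi_seq.filter pvStartsI)) pvInstKey := by
          have hcast : PySem.List.pyGet?
              (PySem.List.sorted (PySem.Set.ofList (remi_seq.filter pvStartsI)) pvInstKey) 0
              = (PySem.List.sorted (PySem.Set.ofList (remi_seq.filter pvStartsI)) pvInstKey)[0]? :=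
            PySem.List.pyGet?_natCast _ 0
          rw [hcast, hins]
          simp
        exact pv_mem_eventsR _ _ hi0 remi_seq none (by intro x hx; cases hx)
          (fun u hu hui => pv_mem_insts remi_seq u hu hui) e he
      · have hnil := pv_eventsR_nil_of_no_o ((PySem.List.pyGet?
            (PySem.List.sorted (PySem.Set.ofList (remi_seq.filter pvStartsI)) pvInstKey) 0).getD "")
            remi_seq none (by
              intro u hu
              exact Bool.eq_false_iff.mpr (List.any_eq_false.mp hO u hu))
        rw [hnil] at he
        simp at he
    refine List.map_congr_left ?_
    intro i _
    rw [pv_eventsRB]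
    rw [List.filter_map, List.map_map]
    congr 1
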